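-- pv_equiv track=rewrite | github.com/beamcode/epitech_archive | 2021_2022/B-MAT-500-NCY-5-1-304pacman-samuel.palmer/304pacman.py | isFileValid
-- ===== SOURCE A (Python) =====
-- def isFileValid(txt):
--     f = 0
--     p = 0
--     for i in txt:
--         for t in i:
--             if t == 'P':
--                 p += 1
--             if t == 'F':
--                 f += 1
--             if t != '1' and t != '0' and t != 'P' and t != 'F' and t != '\n':
--                 return (1)
--     if p != 1 or f != 1:
--         return (1)
--     return (0)
-- ===== SOURCE B (Python) =====
-- def isFileValid(txt):
--     s = sorted(''.join(txt))
--     p = f = 0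
--     i = 0
--     n = len(s)
--     while i < n:
--         c = s[i]
--         j = i + 1
--         while j < n and s[j] == c:
--             j += 1
--         if c not in '01PF\n':
--             return 1
--         if c == 'P':
--             p = j - i
--         elif c == 'F':
--             f = j - i
--         i = j
--     return 0 if p == 1 and f == 1 else 1
-- ===== Notes on version B (the rewrite author's own statement) =====
-- stated objective: alternative
-- what changed: Instead of A's nested per-character loop with incremental P/F counters and an early return, B sorts the flattened characters and scans the runs of the sorted list: each distinct character is validated once per run and the P/F counts are read off as the lengths of their (contiguous) runs.
import Mathlib
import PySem

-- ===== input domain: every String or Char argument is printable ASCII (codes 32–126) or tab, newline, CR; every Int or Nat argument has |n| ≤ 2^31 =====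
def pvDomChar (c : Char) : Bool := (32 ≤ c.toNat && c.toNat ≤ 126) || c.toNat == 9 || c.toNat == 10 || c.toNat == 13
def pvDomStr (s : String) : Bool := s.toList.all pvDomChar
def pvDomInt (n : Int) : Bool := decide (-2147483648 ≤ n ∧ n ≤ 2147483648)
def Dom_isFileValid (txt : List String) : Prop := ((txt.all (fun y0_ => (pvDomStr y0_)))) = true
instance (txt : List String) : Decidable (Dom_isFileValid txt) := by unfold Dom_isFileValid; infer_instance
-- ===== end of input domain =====

-- B replaces A's nested per-character loop with incremental counters by sorting the
-- flattened characters and scanning its runs (objective: alternative, not faster).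

-- ===== PORT A =====
-- inner 'for t in i' loop: none = the early 'return 1' fired
def isFileValidInner (cs : List Char) (p f : Int) : Option (Int × Int) :=
  match cs with
  | [] => some (p, f)
  | t :: rest =>
      let p := if t = 'P' then p + 1 else p
      let f := if t = 'F' then f + 1 else f
      if t ≠ '1' ∧ t ≠ '0' ∧ t ≠ 'P' ∧ t ≠ 'F' ∧ t ≠ '\n' then none
      else isFileValidInner rest p f

-- outer 'for i in txt' loop
def isFileValidOuter (txt : List String) (p f : Int) : Option (Int × Int) :=
  match txt with
  | [] => some (p, f)
  | i :: rest =>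
      match isFileValidInner i.toList p f with
      | none => none
      | some (p', f') => isFileValidOuter rest p' f'

def isFileValid (txt : List String) : Int :=
  match isFileValidOuter txt 0 0 with
  | none => 1
  | some (p, f) => if p ≠ 1 ∨ f ≠ 1 then 1 else 0

-- ===== PORT B =====
-- Source B's outer while loop over the sorted list; the inner 'while s[j] == c' run scan on
-- the remaining suffix is transcribed as takeWhile/dropWhile, j - i = run.length + 1.
def isFileValidRuns (s : List Char) (p f : Int) : Int :=
  match s with
  | [] => if p = 1 ∧ f = 1 then 0 else 1
  | c :: rest =>
      let run := rest.takeWhile (· == c)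
      let suf := rest.dropWhile (· == c)
      if c ∉ (['0', '1', 'P', 'F', '\n'] : List Char) then 1
      else if c = 'P' then isFileValidRuns suf ((run.length : Int) + 1) f
      else if c = 'F' then isFileValidRuns suf p ((run.length : Int) + 1)
      else isFileValidRuns suf p f
termination_by s.length
decreasing_by
  all_goals
    simpa using Nat.lt_succ_of_le (List.length_dropWhile_le (· == c) rest)

def isFileValid_alt (txt : List String) : Int :=
  isFileValidRuns (PySem.List.sorted ((txt.map String.toList).flatten) (fun c => c) false) 0 0

-- ===== PRECONDITION & SPEC =====
def Spec_isFileValid (txt : List String) (out : Int) : Prop := out = isFileValid_alt txt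
instance (txt : List String) (out : Int) : Decidable (Spec_isFileValid txt out) := by unfold Spec_isFileValid; infer_instance

-- ===== CLAIM =====
def Claim_equal_isFileValid : Prop := ∀ (txt : List String), Dom_isFileValid txt → Spec_isFileValid txt (isFileValid txt)

-- ===== LEMMAS AND PROOFS =====
def okChar (c : Char) : Bool := c ∈ (['0', '1', 'P', 'F', '\n'] : List Char)

theorem inner_eq (cs : List Char) (p f : Int) :
    isFileValidInner cs p f =
      if cs.all okChar then some (p + cs.count 'P', f + cs.count 'F') else none := by
  induction cs generalizing p f with
  | nil => simp [isFileValidInner]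
  | cons t rest ih =>
      simp only [isFileValidInner, ih, List.all_cons, List.count_cons, okChar]
      by_cases h1 : t = 'P' <;> by_cases h2 : t = 'F' <;>
        simp_all [List.mem_cons] <;> split_ifs <;> simp_all <;> omega

theorem outer_eq (txt : List String) (p f : Int) :
    isFileValidOuter txt p f =
      if ((txt.map String.toList).flatten).all okChar then
        some (p + ((txt.map String.toList).flatten).count 'P',
              f + ((txt.map String.toList).flatten).count 'F')
      else none := by
  induction txt generalizing p f with
  | nil => simp [isFileValidOuter]
  | cons i rest ih =>
      simp only [isFileValidOuter, inner_eq, List.map_cons, List.flatten_cons,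
        List.all_append, List.count_append]
      by_cases h : i.toList.all okChar = true <;> simp [h, ih] <;> split_ifs <;>
        simp_all <;> omega

-- characterisation of the run scan on a nondecreasing list
theorem runs_eq (n : Nat) : ∀ (s : List Char), s.length ≤ n → s.Pairwise (· ≤ ·) →
    ∀ (p f : Int), isFileValidRuns s p f =
      if s.all okChar then
        (if (if 'P' ∈ s then (s.count 'P' : Int) else p) = 1 ∧
            (if 'F' ∈ s then (s.count 'F' : Int) else f) = 1 then 0 else 1)
      else 1 := by
  induction n with
  | zero =>
      intro s hlen _ p f
      have : s = [] := List.eq_nil_of_length_eq_zero (Nat.le_zero.mp hlen)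
      subst this; simp [isFileValidRuns]
  | succ n ih =>
      intro s hlen hsort p f
      match s with
      | [] => simp [isFileValidRuns]
      | c :: rest =>
        have hsplit : rest.takeWhile (· == c) ++ rest.dropWhile (· == c) = rest :=
          List.takeWhile_append_dropWhile
        have hrun : ∀ x ∈ rest.takeWhile (· == c), x = c := by
          intro x hx
          simpa using List.mem_takeWhile_imp hx
        have hcsuf : c ∉ rest.dropWhile (· == c) := by
          intro hc
          cases hsuf : rest.dropWhile (· == c) with
          | nil => simp [hsuf] at hc
          | cons d t =>
            have hdne := List.head_dropWhile_not (· == c) (l := rest) (by simp [hsuf] : List.dropWhile (· == c) rest ≠ [])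
            have hd : d ≠ c := by
              have : (rest.dropWhile (· == c)).head (by simp [hsuf]) = d := by simp [hsuf]
              rw [this] at hdne; simpa using hdne
            have hdmem : d ∈ rest := by
              have : d ∈ rest.dropWhile (· == c) := by simp [hsuf]
              exact (List.dropWhile_sublist _).subset this
            have hcd : c ≤ d := (List.pairwise_cons.mp hsort).1 d hdmem
            have hsufsort : (rest.dropWhile (· == c)).Pairwise (· ≤ ·) :=
              List.Pairwise.sublist (List.dropWhile_sublist _) (List.pairwise_cons.mp hsort).2
            rw [hsuf] at hc
            rcases List.mem_cons.mp hc with h | h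
            · exact hd h.symm
            · have hde : d ≤ c := by
                have := (List.pairwise_cons.mp (hsuf ▸ hsufsort)).1 c h
                exact this
              exact hd (le_antisymm hde hcd)
        have hsufsort : (rest.dropWhile (· == c)).Pairwise (· ≤ ·) :=
          List.Pairwise.sublist (List.dropWhile_sublist _) (List.pairwise_cons.mp hsort).2
        have hlensuf : (rest.dropWhile (· == c)).length ≤ n := by
          have := List.length_dropWhile_le (· == c) rest
          simp only [List.length_cons] at hlen; omega
        -- counts/membership in c :: rest in terms of suf
        have hcountsplit : ∀ x : Char, rest.count x =
            (rest.takeWhile (· == c)).count x + (rest.dropWhile (· == c)).count x := by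
          intro x
          conv_lhs => rw [← hsplit]
          exact List.count_append
        have hmemsplit : ∀ x : Char, (x ∈ rest) ↔
            x ∈ rest.takeWhile (· == c) ∨ x ∈ rest.dropWhile (· == c) := by
          intro x
          conv_lhs => rw [← hsplit]
          exact List.mem_append
        have hcount_c : (c :: rest).count c =
            (rest.takeWhile (· == c)).length + 1 := by
          have h1 : (rest.takeWhile (· == c)).count c = (rest.takeWhile (· == c)).length :=
            List.count_eq_length.mpr (fun x hx => by simp [hrun x hx])
          have h2 : (rest.dropWhile (· == c)).count c = 0 :=
            List.count_eq_zero.mpr hcsuf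
          rw [List.count_cons_self, hcountsplit, h1, h2]
        have hcount_ne : ∀ x, x ≠ c → (c :: rest).count x = (rest.dropWhile (· == c)).count x := by
          intro x hx
          have h1 : (rest.takeWhile (· == c)).count x = 0 :=
            List.count_eq_zero.mpr (fun hmem => hx (hrun x hmem))
          rw [List.count_cons_of_ne (fun h => hx h.symm), hcountsplit, h1, Nat.zero_add]
        have hmem_ne : ∀ x, x ≠ c → ((x ∈ (c :: rest)) ↔ x ∈ rest.dropWhile (· == c)) := by
          intro x hx
          rw [List.mem_cons, hmemsplit]
          constructor
          · rintro (h | h | h)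
            · exact absurd h hx
            · exact absurd (hrun x h) hx
            · exact h
          · intro h; exact Or.inr (Or.inr h)
        have hallsplit : rest.all okChar =
            ((rest.takeWhile (· == c)).all okChar && (rest.dropWhile (· == c)).all okChar) := by
          conv_lhs => rw [← hsplit]
          exact List.all_append
        have hall : (c :: rest).all okChar =
            (okChar c && (rest.dropWhile (· == c)).all okChar) := by
          rw [List.all_cons, hallsplit]
          by_cases h : okChar c = true
          · have ht : (rest.takeWhile (· == c)).all okChar = true :=
              List.all_eq_true.mpr (fun x hx => by rw [hrun x hx]; exact h)
            rw [ht]; simp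
          · rw [Bool.not_eq_true] at h; rw [h]; simp
        rw [isFileValidRuns]
        by_cases hok : okChar c = true
        · have hmemok : c ∈ (['0', '1', 'P', 'F', '\n'] : List Char) := by
            simpa [okChar] using hok
          rw [if_neg (not_not_intro hmemok)]
          by_cases hP : c = 'P'
          · subst hP
            rw [if_pos rfl, ih _ hlensuf hsufsort]
            rw [hall]
            simp only [hok, Bool.true_and]
            by_cases hallsuf : ((rest.dropWhile (· == ('P' : Char))).all okChar) = true
            · rw [if_pos hallsuf, if_pos hallsuf]
              have hPmem : ('P' : Char) ∈ ('P' :: rest) := List.mem_cons_self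
              rw [if_pos hPmem]
              have hPsuf : ('P' : Char) ∉ rest.dropWhile (· == ('P' : Char)) := hcsuf
              rw [if_neg hPsuf, hcount_c]
              have hFmem := hmem_ne 'F' (by decide)
              have hFcnt := hcount_ne 'F' (by decide)
              by_cases hF : ('F' : Char) ∈ rest.dropWhile (· == ('P' : Char))
              · rw [if_pos hF, if_pos (hFmem.mpr hF), hFcnt]
                push_cast; ring_nf
              · rw [if_neg hF, if_neg (fun h => hF (hFmem.mp h))]
                push_cast; ring_nf
            · rw [if_neg hallsuf, if_neg hallsuf]
          · by_cases hF : c = 'F'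
            · subst hF
              rw [if_neg (by decide), if_pos rfl, ih _ hlensuf hsufsort]
              rw [hall]
              simp only [hok, Bool.true_and]
              by_cases hallsuf : ((rest.dropWhile (· == ('F' : Char))).all okChar) = true
              · rw [if_pos hallsuf, if_pos hallsuf]
                have hFmem : ('F' : Char) ∈ ('F' :: rest) := List.mem_cons_self
                rw [if_pos hFmem, if_neg hcsuf, hcount_c]
                have hPmem := hmem_ne 'P' (by decide)
                have hPcnt := hcount_ne 'P' (by decide)
                by_cases hP' : ('P' : Char) ∈ rest.dropWhile (· == ('F' : Char))
                · rw [if_pos hP', if_pos (hPmem.mpr hP'), hPcnt]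
                  push_cast; ring_nf
                · rw [if_neg hP', if_neg (fun h => hP' (hPmem.mp h))]
                  push_cast; ring_nf
              · rw [if_neg hallsuf, if_neg hallsuf]
            · rw [if_neg hP, if_neg hF, ih _ hlensuf hsufsort]
              rw [hall]
              simp only [hok, Bool.true_and]
              by_cases hallsuf : ((rest.dropWhile (· == c)).all okChar) = true
              · rw [if_pos hallsuf, if_pos hallsuf]
                have hPm := hmem_ne 'P' (fun h => hP h.symm)
                have hPc := hcount_ne 'P' (fun h => hP h.symm)
                have hFm := hmem_ne 'F' (fun h => hF h.symm)
                have hFc := hcount_ne 'F' (fun h => hF h.symm)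
                simp only [hPm, hFm, hPc, hFc]
              · rw [if_neg hallsuf, if_neg hallsuf]
        · rw [if_pos (by simpa [okChar] using hok)]
          rw [hall, Bool.eq_false_iff.mpr hok]
          simp

-- ===== VERDICT =====
theorem isFileValid_spec : Claim_equal_isFileValid := by
  intro txt _
  unfold Spec_isFileValid isFileValid isFileValid_alt
  set s := (txt.map String.toList).flatten with hs
  have hperm : (PySem.List.sorted s (fun c => c) false).Perm s := PySem.List.sorted_perm _ _ _
  have hsort : (PySem.List.sorted s (fun c => c) false).Pairwise (· ≤ ·) := by
    simpa using PySem.List.sorted_pairwise (xs := s) (key := fun c => c)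
  rw [outer_eq, runs_eq (PySem.List.sorted s (fun c => c) false).length _ le_rfl hsort]
  have hall : ((PySem.List.sorted s (fun c => c) false).all okChar = true) ↔ (s.all okChar = true) := by
    rw [List.all_eq_true, List.all_eq_true]
    exact ⟨fun h x hx => h x (hperm.mem_iff.mpr hx), fun h x hx => h x (hperm.mem_iff.mp hx)⟩
  have hcP : (PySem.List.sorted s (fun c => c) false).count 'P' = s.count 'P' := hperm.count_eq 'P'
  have hcF : (PySem.List.sorted s (fun c => c) false).count 'F' = s.count 'F' := hperm.count_eq 'F'
  have hmP : (('P' : Char) ∈ PySem.List.sorted s (fun c => c) false) ↔ ('P' : Char) ∈ s := hperm.mem_iff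
  have hmF : (('F' : Char) ∈ PySem.List.sorted s (fun c => c) false) ↔ ('F' : Char) ∈ s := hperm.mem_iff
  rw [hcP, hcF]
  by_cases h : s.all okChar = true
  · rw [if_pos h, if_pos (hall.mpr h)]
    simp only [Int.zero_add]
    by_cases hP : ('P' : Char) ∈ s
    · rw [if_pos (hmP.mpr hP)]
      by_cases hF : ('F' : Char) ∈ s
      · rw [if_pos (hmF.mpr hF)]
        split_ifs <;> simp_all <;> omega
      · rw [if_neg (fun hh => hF (hmF.mp hh))]
        have : s.count 'F' = 0 := List.count_eq_zero.mpr hF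
        split_ifs <;> simp_all <;> omega
    · rw [if_neg (fun hh => hP (hmP.mp hh))]
      have h0 : s.count 'P' = 0 := List.count_eq_zero.mpr hP
      by_cases hF : ('F' : Char) ∈ s
      · rw [if_pos (hmF.mpr hF)]
        split_ifs <;> simp_all <;> omega
      · rw [if_neg (fun hh => hF (hmF.mp hh))]
        have : s.count 'F' = 0 := List.count_eq_zero.mpr hF
        split_ifs <;> simp_all <;> omega
  · rw [if_neg h, if_neg (fun hh => h (hall.mp hh))]
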